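-- pv_equiv track=rewrite | github.com/masszhou/NeoMAGI | src/infra/doctor.py | _count_curated_sections
-- ===== SOURCE A (Python) =====
-- def _count_curated_sections(content: str) -> int:
--     """Count ## header sections with non-empty body.
--
--     Must match MemoryIndexer._split_by_headers() + index_curated_memory()
--     filtering logic: only sections whose body.strip() is truthy are counted.
--     """
--     if not content.strip():
--         return 0
--
--     count = 0
--     current_title = ""
--     body_lines: list[str] = []
--
--     for line in content.split("\n"):
--         if line.startswith("## "):
--             if (current_title or body_lines) and "\n".join(body_lines).strip():
--                 count += 1
--             current_title = line[3:].strip()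
--             body_lines = []
--         elif line.startswith("# ") and not current_title:
--             current_title = line[2:].strip()
--             body_lines = []
--         else:
--             body_lines.append(line)
--
--     if (current_title or body_lines) and "\n".join(body_lines).strip():
--         count += 1
--
--     return count
-- ===== SOURCE B (Python) =====
-- def _count_curated_sections(content: str) -> int:
--     """Parse into a list of section bodies first, then count the non-blank ones."""
--     if not content.strip():
--         return 0
--     sections = []
--     title = ""
--     body = []
--     for line in content.split("\n"):
--         is_h2 = line.startswith("## ")
--         if is_h2 or (line.startswith("# ") and not title):
--             if is_h2 and (title or body):
--                 sections.append(body)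
--             title = (line[3:] if is_h2 else line[2:]).strip()
--             body = []
--         else:
--             body.append(line)
--     if title or body:
--         sections.append(body)
--     return sum(1 for b in sections if any(l.strip() for l in b))
-- ===== Notes on version B (the rewrite author's own statement) =====
-- stated objective: alternative
-- what changed: B first parses the content into a list of section body-line lists (one combined header branch, flush-on-boundary), then counts in a separate pass the sections containing any non-blank line, instead of A's inline counter that joins and strips the accumulated body at each header.
import Mathlib
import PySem

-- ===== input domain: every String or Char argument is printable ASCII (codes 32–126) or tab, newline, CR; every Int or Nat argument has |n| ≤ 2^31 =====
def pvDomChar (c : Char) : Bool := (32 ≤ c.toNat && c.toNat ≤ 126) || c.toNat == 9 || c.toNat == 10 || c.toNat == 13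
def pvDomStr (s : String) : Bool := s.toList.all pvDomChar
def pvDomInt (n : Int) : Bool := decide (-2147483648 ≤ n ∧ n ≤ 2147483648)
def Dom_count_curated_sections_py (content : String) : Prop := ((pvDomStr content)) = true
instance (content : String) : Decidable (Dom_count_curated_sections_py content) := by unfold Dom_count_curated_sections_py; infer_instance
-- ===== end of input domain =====

-- B parses the content into a list of section bodies first and counts the non-blank ones
-- in a separate pass (any non-blank line instead of join+strip); objective: simpler decomposition.

-- ===== PORT A =====
-- A's loop state: (count, current_title, body_lines)
def pvStepA (s : Int × List Char × List (List Char)) (line : List Char) :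
    Int × List Char × List (List Char) :=
  let (count, title, body) := s
  if PySem.Chars.startswith line ['#', '#', ' '] then
    (if (!title.isEmpty || !body.isEmpty)
        && !(PySem.Chars.strip (PySem.Chars.join ['\n'] body)).isEmpty
     then count + 1 else count,
     PySem.Chars.strip (PySem.Chars.slice line (some 3) none), [])
  else if PySem.Chars.startswith line ['#', ' '] && title.isEmpty then
    (count, PySem.Chars.strip (PySem.Chars.slice line (some 2) none), [])
  else
    (count, title, body ++ [line])

def count_curated_sections_py (content : String) : Int :=
  if (PySem.Chars.strip content.toList).isEmpty then 0
  else
    let st := (PySem.Chars.splitOn content.toList ['\n']).foldl pvStepA (0, [], [])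
    let (count, title, body) := st
    if (!title.isEmpty || !body.isEmpty)
       && !(PySem.Chars.strip (PySem.Chars.join ['\n'] body)).isEmpty
    then count + 1 else count

-- ===== PORT B =====
-- B's loop state: (sections, title, body)
def pvStepB (s : List (List (List Char)) × List Char × List (List Char)) (line : List Char) :
    List (List (List Char)) × List Char × List (List Char) :=
  let (secs, title, body) := s
  let isH2 := PySem.Chars.startswith line ['#', '#', ' ']
  if isH2 || (PySem.Chars.startswith line ['#', ' '] && title.isEmpty) then
    ((if isH2 && (!title.isEmpty || !body.isEmpty) then secs ++ [body] else secs),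
     PySem.Chars.strip
       (if isH2 then PySem.Chars.slice line (some 3) none
        else PySem.Chars.slice line (some 2) none),
     [])
  else
    (secs, title, body ++ [line])

-- any(l.strip() for l in b)
def pvNonBlank (b : List (List Char)) : Bool := b.any (fun l => !(PySem.Chars.strip l).isEmpty)

def count_curated_sections_py_alt (content : String) : Int :=
  if (PySem.Chars.strip content.toList).isEmpty then 0
  else
    let st := (PySem.Chars.splitOn content.toList ['\n']).foldl pvStepB ([], [], [])
    let (secs, title, body) := st
    let secs := if !title.isEmpty || !body.isEmpty then secs ++ [body] else secs
    ((secs.filter pvNonBlank).length : Int)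

-- ===== PRECONDITION & SPEC =====
def Spec_count_curated_sections_py (content : String) (out : Int) : Prop := out = count_curated_sections_py_alt content
instance (content : String) (out : Int) : Decidable (Spec_count_curated_sections_py content out) := by unfold Spec_count_curated_sections_py; infer_instance

-- ===== CLAIM (what is proved, stated in full; the proofs are below) =====
def Claim_equal_count_curated_sections_py : Prop := ∀ (content : String), Dom_count_curated_sections_py content → Spec_count_curated_sections_py content (count_curated_sections_py content)

-- ===== LEMMAS AND PROOFS =====

theorem pv_forall_dropWhile_iff (p : Char → Bool) (l : List Char) :
    (∀ x ∈ l.dropWhile p, p x = true) ↔ (∀ x ∈ l, p x = true) := by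
  constructor
  · intro h x hx
    rcases List.mem_append.mp ((List.takeWhile_append_dropWhile (p := p) (l := l)) ▸ hx) with h1 | h2
    · exact List.mem_takeWhile_imp h1
    · exact h x h2
  · intro h x hx
    exact h x ((List.dropWhile_sublist (p := p) (l := l)).mem hx)

theorem pv_strip_nil_iff (cs : List Char) :
    PySem.Chars.strip cs = [] ↔ ∀ c ∈ cs, PySem.Chars.isspace c = true := by
  simp only [PySem.Chars.strip, PySem.Chars.rstrip, PySem.Chars.lstrip,
    List.reverse_eq_nil_iff, List.dropWhile_eq_nil_iff, List.mem_reverse]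
  exact pv_forall_dropWhile_iff _ _

theorem pv_join_space_iff (bd : List (List Char)) :
    (∀ c ∈ PySem.Chars.join ['\n'] bd, PySem.Chars.isspace c = true)
      ↔ ∀ l ∈ bd, ∀ c ∈ l, PySem.Chars.isspace c = true := by
  induction bd with
  | nil => simp [PySem.Chars.join_nil]
  | cons a t ih =>
    cases t with
    | nil => simp [PySem.Chars.join_singleton]
    | cons b t' =>
      rw [PySem.Chars.join_cons_cons]
      constructor
      · intro h l hl c hc
        rcases List.mem_cons.mp hl with rfl | hl
        · exact h c (by simp [hc])
        · exact (ih.mp (fun c hc => h c (by simp [hc]))) l hl c hc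
      · intro h c hc
        rcases List.mem_append.mp hc with hc | hc
        · rcases List.mem_append.mp hc with hc | hc
          · exact h a (by simp) c hc
          · simp at hc; subst hc; decide
        · exact (ih.mpr (fun l hl => h l (by simp [hl]))) c hc

theorem pv_key (bd : List (List Char)) :
    (!(PySem.Chars.strip (PySem.Chars.join ['\n'] bd)).isEmpty) = pvNonBlank bd := by
  unfold pvNonBlank
  by_cases h : ∀ l ∈ bd, ∀ c ∈ l, PySem.Chars.isspace c = true
  · have h1 : PySem.Chars.strip (PySem.Chars.join ['\n'] bd) = [] :=
      (pv_strip_nil_iff _).mpr ((pv_join_space_iff bd).mpr h)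
    have h2 : bd.any (fun l => !(PySem.Chars.strip l).isEmpty) = false := by
      simp only [List.any_eq_false]
      intro l hl
      simp [(pv_strip_nil_iff l).mpr (h l hl)]
    simp [h1, h2]
  · have h1 : PySem.Chars.strip (PySem.Chars.join ['\n'] bd) ≠ [] := by
      intro hc
      exact h ((pv_join_space_iff bd).mp ((pv_strip_nil_iff _).mp hc))
    have h2 : bd.any (fun l => !(PySem.Chars.strip l).isEmpty) = true := by
      simp only [not_forall] at h
      obtain ⟨l, hl, c, hc, hcs⟩ := h
      refine List.any_eq_true.mpr ⟨l, hl, ?_⟩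
      simp only [Bool.not_eq_eq_eq_not, Bool.not_true, List.isEmpty_eq_false_iff]
      intro hnil
      exact hcs ((pv_strip_nil_iff l).mp hnil c hc)
    simp [h1, h2]

theorem pv_count_append (secs : List (List (List Char))) (bd : List (List Char)) :
    (((secs ++ [bd]).filter pvNonBlank).length : Int)
      = ((secs.filter pvNonBlank).length : Int) + (if pvNonBlank bd then 1 else 0) := by
  rcases hb : pvNonBlank bd <;> simp [List.filter_append, hb]

theorem pv_step_pres (line : List Char)
    (a : Int × List Char × List (List Char))
    (b : List (List (List Char)) × List Char × List (List Char))
    (h1 : a.1 = ((b.1.filter pvNonBlank).length : Int))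
    (h2 : a.2.1 = b.2.1) (h3 : a.2.2 = b.2.2) :
    (pvStepA a line).1 = (((pvStepB b line).1.filter pvNonBlank).length : Int)
      ∧ (pvStepA a line).2.1 = (pvStepB b line).2.1
      ∧ (pvStepA a line).2.2 = (pvStepB b line).2.2 := by
  obtain ⟨c, t, bd⟩ := a
  obtain ⟨secs, t', bd'⟩ := b
  simp only at h1 h2 h3
  subst h2 h3 h1
  unfold pvStepA pvStepB
  by_cases hh2 : PySem.Chars.startswith line ['#', '#', ' '] = true
  · simp only [hh2, Bool.true_or, if_true, Bool.true_and]
    by_cases hg : (!t.isEmpty || !bd.isEmpty) = true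
    · simp only [hg, if_true, pv_key, pv_count_append]
      rcases hnb : pvNonBlank bd <;> simp
    · simp only [hg, Bool.and_eq_true] at *
      simp
  · simp only [Bool.not_eq_true] at hh2
    simp only [hh2, Bool.false_or, Bool.false_and]
    by_cases hg : (PySem.Chars.startswith line ['#', ' '] && t.isEmpty) = true
    · simp [hg]
    · simp only [Bool.not_eq_true] at hg
      simp [hg]

theorem pv_fold_pres (lines : List (List Char))
    (a : Int × List Char × List (List Char))
    (b : List (List (List Char)) × List Char × List (List Char))
    (h1 : a.1 = ((b.1.filter pvNonBlank).length : Int))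
    (h2 : a.2.1 = b.2.1) (h3 : a.2.2 = b.2.2) :
    (lines.foldl pvStepA a).1 = (((lines.foldl pvStepB b).1.filter pvNonBlank).length : Int)
      ∧ (lines.foldl pvStepA a).2.1 = (lines.foldl pvStepB b).2.1
      ∧ (lines.foldl pvStepA a).2.2 = (lines.foldl pvStepB b).2.2 := by
  induction lines generalizing a b with
  | nil => exact ⟨h1, h2, h3⟩
  | cons line rest ih =>
    obtain ⟨g1, g2, g3⟩ := pv_step_pres line a b h1 h2 h3
    exact ih _ _ g1 g2 g3

-- ===== VERDICT (by name: the statement is the Claim_ definition above) =====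
theorem count_curated_sections_py_spec : Claim_equal_count_curated_sections_py := by
  intro content _
  unfold Spec_count_curated_sections_py count_curated_sections_py count_curated_sections_py_alt
  by_cases hs : (PySem.Chars.strip content.toList).isEmpty = true
  · simp [hs]
  · simp only [Bool.not_eq_true] at hs
    simp only [hs]
    obtain ⟨h1, h2, h3⟩ := pv_fold_pres (PySem.Chars.splitOn content.toList ['\n'])
      (0, [], []) ([], [], []) (by simp) rfl rfl
    set aSt := (PySem.Chars.splitOn content.toList ['\n']).foldl pvStepA (0, [], []) with ha
    set bSt := (PySem.Chars.splitOn content.toList ['\n']).foldl pvStepB ([], [], []) with hb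
    obtain ⟨c, t, bd⟩ := aSt
    obtain ⟨secs, t', bd'⟩ := bSt
    simp only at h1 h2 h3
    subst h2 h3 h1
    simp only [pv_key]
    by_cases hg : (!t.isEmpty || !bd.isEmpty) = true
    · simp only [hg, Bool.true_and, if_true]
      rcases hnb : pvNonBlank bd <;> simp [hnb]
    · simp only [Bool.not_eq_true] at hg
      simp [hg]
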